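-- pv_equiv track=rewrite | github.com/stephanlamoureux/code-challenges | changing-sequence.py | ArrayChallenge
-- ===== SOURCE A (Python) =====
-- def ArrayChallenge(arr):
--   result = 0
--
--   if len(arr) < 3:
--     result = -1
--
--   lastAscendValue = 0
--   lastDescendValue = 0
--
--   fwdAscending = False
--   backwardAscending = False
--
--   fwdDescending = False
--   backwardDescending = False
--
--   # ASCENDING CHECK:
--   if arr[0] < arr[1]:
--     # Ascending forwards
--     for num in range(len(arr) - 1):
--       if arr[num] < arr[num + 1]:
--         fwdAscending = True
--         lastAscendValue = num + 1
--
--     # Ascending backwards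
--     for num in range(len(arr) - 1, 0, -1):
--       if arr[num] < arr[num - 1]:
--         backwardAscending = True
--
--   # DESCENDING CHECK:
--   else:
--     # Descending forwards
--     for num in range(len(arr) - 1):
--       if arr[num] > arr[num + 1]:
--         fwdDescending = True
--         lastDescendValue = num + 1
--
--     # Descending backwards
--     for num in range(len(arr) - 1, 0, -1):
--       if arr[num] > arr[num - 1]:
--         backwardDescending = True
--
--   if fwdAscending and backwardAscending:
--     result = lastAscendValue
--   elif fwdDescending and backwardDescending:
--     result = lastDescendValue
--
--   # If there is only a single sequence return -1
--   if not result: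
--     return -1
--   else:
--     return result
-- ===== SOURCE B (Python) =====
-- def ArrayChallenge(arr):
--   ascending = arr[0] < arr[1]
--   hasUp = hasDown = False
--   lastUp = lastDown = -1
--   for i in range(len(arr) - 1):
--     if arr[i] < arr[i + 1]:
--       hasUp = True
--       lastUp = i + 1
--     elif arr[i] > arr[i + 1]:
--       hasDown = True
--       lastDown = i + 1
--   if not (hasUp and hasDown):
--     return -1
--   return lastUp if ascending else lastDown
-- ===== Notes on version B (the rewrite author's own statement) =====
-- stated objective: simpler
-- what changed: Replaces A's branch on direction with four direction-specific loops (a forward and a backward scan per branch) by a single adjacent-pair pass that tracks hasUp/hasDown and the last up/down step indices.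
import Mathlib
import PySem

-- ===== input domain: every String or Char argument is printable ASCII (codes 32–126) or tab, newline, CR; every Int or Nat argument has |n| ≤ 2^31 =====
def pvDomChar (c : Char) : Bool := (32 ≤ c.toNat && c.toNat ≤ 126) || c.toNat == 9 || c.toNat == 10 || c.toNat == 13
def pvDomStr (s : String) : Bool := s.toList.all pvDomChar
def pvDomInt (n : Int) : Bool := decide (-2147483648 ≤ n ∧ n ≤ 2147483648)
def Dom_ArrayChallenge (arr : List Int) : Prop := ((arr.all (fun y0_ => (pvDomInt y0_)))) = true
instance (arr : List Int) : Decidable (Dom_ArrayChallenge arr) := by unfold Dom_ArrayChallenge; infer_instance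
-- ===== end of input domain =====

-- B replaces A's direction branch with four direction-specific loops by one adjacent-pair pass; objective: simpler.

-- ===== PORT A =====
def ArrayChallenge (arr : List Int) : Int :=
  let result : Int := if arr.length < 3 then -1 else 0
  if PySem.List.pyGetD arr 0 0 < PySem.List.pyGetD arr 1 0 then
    -- ascending forwards
    let st := (PySem.List.pyRange 0 ((arr.length : Int) - 1) 1).foldl
      (fun (s : Bool × Int) num =>
        if PySem.List.pyGetD arr num 0 < PySem.List.pyGetD arr (num + 1) 0 then (true, num + 1) else s)
      (false, 0)
    -- ascending backwards
    let back := (PySem.List.pyRange ((arr.length : Int) - 1) 0 (-1)).foldl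
      (fun (b : Bool) num =>
        if PySem.List.pyGetD arr num 0 < PySem.List.pyGetD arr (num - 1) 0 then true else b)
      false
    let result := if st.1 && back then st.2 else result
    if result = 0 then -1 else result
  else
    -- descending forwards
    let st := (PySem.List.pyRange 0 ((arr.length : Int) - 1) 1).foldl
      (fun (s : Bool × Int) num =>
        if PySem.List.pyGetD arr num 0 > PySem.List.pyGetD arr (num + 1) 0 then (true, num + 1) else s)
      (false, 0)
    -- descending backwards
    let back := (PySem.List.pyRange ((arr.length : Int) - 1) 0 (-1)).foldl
      (fun (b : Bool) num =>
        if PySem.List.pyGetD arr num 0 > PySem.List.pyGetD arr (num - 1) 0 then true else b)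
      false
    let result := if st.1 && back then st.2 else result
    if result = 0 then -1 else result

-- ===== PORT B =====
def ArrayChallenge_alt (arr : List Int) : Int :=
  let ascending := PySem.List.pyGetD arr 0 0 < PySem.List.pyGetD arr 1 0
  let st := (PySem.List.pyRange 0 ((arr.length : Int) - 1) 1).foldl
    (fun (s : Bool × Bool × Int × Int) i =>
      if PySem.List.pyGetD arr i 0 < PySem.List.pyGetD arr (i + 1) 0 then (true, s.2.1, i + 1, s.2.2.2)
      else if PySem.List.pyGetD arr i 0 > PySem.List.pyGetD arr (i + 1) 0 then (s.1, true, s.2.2.1, i + 1)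
      else s)
    (false, false, -1, -1)
  if !(st.1 && st.2.1) then -1
  else if ascending then st.2.2.1 else st.2.2.2

-- ===== PRECONDITION & SPEC =====
-- Pre_ excludes only lists of length < 2, on which both Pythons raise IndexError at the initial two-element comparison.
def Pre_ArrayChallenge (arr : List Int) : Prop := 2 ≤ arr.length
instance (arr : List Int) : Decidable (Pre_ArrayChallenge arr) := by
  unfold Pre_ArrayChallenge; infer_instance

def pvWitness_ArrayChallenge : List Int := [1, 2, 1]

def Spec_ArrayChallenge (arr : List Int) (out : Int) : Prop := out = ArrayChallenge_alt arr
instance (arr : List Int) (out : Int) : Decidable (Spec_ArrayChallenge arr out) := by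
  unfold Spec_ArrayChallenge; infer_instance

-- ===== CLAIM (what is proved, stated in full; the proofs are below) =====
def Claim_equal_ArrayChallenge : Prop :=
  ∀ (arr : List Int), Dom_ArrayChallenge arr → Pre_ArrayChallenge arr →
    Spec_ArrayChallenge arr (ArrayChallenge arr)

-- ===== LEMMAS AND PROOFS =====

-- boolean "found" fold is List.any
theorem pv_bfold_any (q : Int → Prop) [DecidablePred q] (L : List Int) (b : Bool) :
    L.foldl (fun (b : Bool) i => if q i then true else b) b
      = (b || L.any (fun i => decide (q i))) := by
  induction L generalizing b with
  | nil => simp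
  | cons x L ih =>
    simp only [List.foldl_cons, List.any_cons, ih]
    by_cases h : q x <;> simp [h]

-- first component of A's (flag, lastIndex) fold is List.any
theorem pv_pfold_fst (p : Int → Prop) [DecidablePred p] (L : List Int) (b : Bool) (v : Int) :
    (L.foldl (fun (s : Bool × Int) i => if p i then (true, i + 1) else s) (b, v)).1
      = (b || L.any (fun i => decide (p i))) := by
  induction L generalizing b v with
  | nil => simp
  | cons x L ih =>
    simp only [List.foldl_cons, List.any_cons]
    by_cases h : p x <;> simp [h, ih]

-- when a hit exists, the last-index component is independent of the initial state
theorem pv_pfold_snd_indep (p : Int → Prop) [DecidablePred p] (L : List Int)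
    (hany : L.any (fun i => decide (p i)) = true) (b b' : Bool) (v v' : Int) :
    (L.foldl (fun (s : Bool × Int) i => if p i then (true, i + 1) else s) (b, v)).2
      = (L.foldl (fun (s : Bool × Int) i => if p i then (true, i + 1) else s) (b', v')).2 := by
  induction L generalizing b b' v v' with
  | nil => simp at hany
  | cons x L ih =>
    by_cases h : p x
    · simp only [List.foldl_cons, if_pos h]
    · simp only [List.any_cons, h, decide_false, Bool.false_or] at hany
      simp only [List.foldl_cons, if_neg h]
      exact ih hany _ _ _ _

-- the last-index component stays ≥ 1 when the indices are ≥ 0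
theorem pv_pfold_snd_pos (p : Int → Prop) [DecidablePred p] (L : List Int)
    (hL : ∀ i ∈ L, 0 ≤ i) (b : Bool) (v : Int) (hv : 1 ≤ v) :
    1 ≤ (L.foldl (fun (s : Bool × Int) i => if p i then (true, i + 1) else s) (b, v)).2 := by
  induction L generalizing b v with
  | nil => simpa
  | cons x L ih =>
    have hx : 0 ≤ x := hL x (by simp)
    simp only [List.foldl_cons]
    by_cases h : p x
    · simp only [if_pos h]
      exact ih (fun i hi => hL i (by simp [hi])) _ _ (by omega)
    · simp only [if_neg h]
      exact ih (fun i hi => hL i (by simp [hi])) _ _ hv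

-- B's single four-component fold is the product of A's two (flag, lastIndex) folds
theorem pv_bstep_prod (p q : Int → Prop) [DecidablePred p] [DecidablePred q]
    (hpq : ∀ i, p i → ¬ q i) (L : List Int) (hu hd : Bool) (lu ld : Int) :
    L.foldl
      (fun (s : Bool × Bool × Int × Int) i =>
        if p i then (true, s.2.1, i + 1, s.2.2.2)
        else if q i then (s.1, true, s.2.2.1, i + 1)
        else s)
      (hu, hd, lu, ld)
    = ((L.foldl (fun (s : Bool × Int) i => if p i then (true, i + 1) else s) (hu, lu)).1,
       (L.foldl (fun (s : Bool × Int) i => if q i then (true, i + 1) else s) (hd, ld)).1,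
       (L.foldl (fun (s : Bool × Int) i => if p i then (true, i + 1) else s) (hu, lu)).2,
       (L.foldl (fun (s : Bool × Int) i => if q i then (true, i + 1) else s) (hd, ld)).2) := by
  induction L generalizing hu hd lu ld with
  | nil => rfl
  | cons x L ih =>
    simp only [List.foldl_cons]
    by_cases hp : p x
    · have hq : ¬ q x := hpq x hp
      simp only [if_pos hp, if_neg hq, ih]
    · by_cases hq : q x
      · simp only [if_neg hp, if_pos hq, ih]
      · simp only [if_neg hp, if_neg hq, ih]

-- A's countdown range(a, 0, -1) scan of f(num) is the forward range(0, a) scan of f(i+1)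
theorem pv_back_any (f : Int → Bool) (a : Int) :
    (PySem.List.pyRange a 0 (-1)).any f
      = (PySem.List.pyRange 0 a 1).any (fun i => f (i + 1)) := by
  rw [PySem.List.pyRange_neg_one_eq_reverse, List.any_reverse,
    PySem.List.pyRange_one, PySem.List.pyRange_one]
  simp only [List.any_map, Function.comp_def, zero_add]
  have h1 : a + 1 - 1 = a - 0 := by ring
  have h2 : (fun x : Nat => f (1 + (x : Int))) = fun x : Nat => f ((x : Int) + 1) := by
    funext k; rw [add_comm]
  rw [h1, h2]
-- main equivalence: both sides reduce to the same any/last-index data over the forward pair scan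
theorem pv_main (arr : List Int) : ArrayChallenge arr = ArrayChallenge_alt arr := by
  have hexcl : ∀ i : Int, PySem.List.pyGetD arr i 0 < PySem.List.pyGetD arr (i + 1) 0 →
      ¬ PySem.List.pyGetD arr (i + 1) 0 < PySem.List.pyGetD arr i 0 := fun i h => lt_asymm h
  simp only [ArrayChallenge, ArrayChallenge_alt, gt_iff_lt]
  rw [pv_bstep_prod (fun i => PySem.List.pyGetD arr i 0 < PySem.List.pyGetD arr (i + 1) 0)
      (fun i => PySem.List.pyGetD arr (i + 1) 0 < PySem.List.pyGetD arr i 0) hexcl]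
  rw [pv_bfold_any (fun num => PySem.List.pyGetD arr num 0 < PySem.List.pyGetD arr (num - 1) 0),
      pv_bfold_any (fun num => PySem.List.pyGetD arr (num - 1) 0 < PySem.List.pyGetD arr num 0),
      pv_back_any, pv_back_any,
      pv_pfold_fst (fun num => PySem.List.pyGetD arr num 0 < PySem.List.pyGetD arr (num + 1) 0)
        (PySem.List.pyRange 0 ((arr.length : Int) - 1) 1) false 0,
      pv_pfold_fst (fun num => PySem.List.pyGetD arr (num + 1) 0 < PySem.List.pyGetD arr num 0)
        (PySem.List.pyRange 0 ((arr.length : Int) - 1) 1) false 0,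
      pv_pfold_fst (fun num => PySem.List.pyGetD arr num 0 < PySem.List.pyGetD arr (num + 1) 0)
        (PySem.List.pyRange 0 ((arr.length : Int) - 1) 1) false (-1),
      pv_pfold_fst (fun num => PySem.List.pyGetD arr (num + 1) 0 < PySem.List.pyGetD arr num 0)
        (PySem.List.pyRange 0 ((arr.length : Int) - 1) 1) false (-1)]
  simp only [add_sub_cancel_right, Bool.false_or]
  have hLnn : ∀ i ∈ PySem.List.pyRange 0 ((arr.length : Int) - 1) 1, 0 ≤ i := by
    intro i hi
    exact ((PySem.List.mem_pyRange_one).1 hi).1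
  by_cases hu : ((PySem.List.pyRange 0 ((arr.length : Int) - 1) 1).any fun i =>
      decide (PySem.List.pyGetD arr i 0 < PySem.List.pyGetD arr (i + 1) 0)) = true
  · by_cases hd : ((PySem.List.pyRange 0 ((arr.length : Int) - 1) 1).any fun i =>
        decide (PySem.List.pyGetD arr (i + 1) 0 < PySem.List.pyGetD arr i 0)) = true
    · have e1 : (List.foldl (fun (s : Bool × Int) num =>
          if PySem.List.pyGetD arr num 0 < PySem.List.pyGetD arr (num + 1) 0 then (true, num + 1) else s)
          (false, 0) (PySem.List.pyRange 0 ((arr.length : Int) - 1) 1)).2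
          = (List.foldl (fun (s : Bool × Int) num =>
          if PySem.List.pyGetD arr num 0 < PySem.List.pyGetD arr (num + 1) 0 then (true, num + 1) else s)
          (false, -1) (PySem.List.pyRange 0 ((arr.length : Int) - 1) 1)).2 :=
        pv_pfold_snd_indep _ _ hu false false 0 (-1)
      have e1' : (List.foldl (fun (s : Bool × Int) num =>
          if PySem.List.pyGetD arr num 0 < PySem.List.pyGetD arr (num + 1) 0 then (true, num + 1) else s)
          (false, 0) (PySem.List.pyRange 0 ((arr.length : Int) - 1) 1)).2
          = (List.foldl (fun (s : Bool × Int) num =>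
          if PySem.List.pyGetD arr num 0 < PySem.List.pyGetD arr (num + 1) 0 then (true, num + 1) else s)
          (false, 1) (PySem.List.pyRange 0 ((arr.length : Int) - 1) 1)).2 :=
        pv_pfold_snd_indep _ _ hu false false 0 1
      have p1 : (List.foldl (fun (s : Bool × Int) num =>
          if PySem.List.pyGetD arr num 0 < PySem.List.pyGetD arr (num + 1) 0 then (true, num + 1) else s)
          (false, 0) (PySem.List.pyRange 0 ((arr.length : Int) - 1) 1)).2 ≠ 0 := by
        rw [e1']
        have := pv_pfold_snd_pos (fun num => PySem.List.pyGetD arr num 0 < PySem.List.pyGetD arr (num + 1) 0)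
          (PySem.List.pyRange 0 ((arr.length : Int) - 1) 1) hLnn false 1 le_rfl
        beta_reduce at this
        omega
      have e2 : (List.foldl (fun (s : Bool × Int) num =>
          if PySem.List.pyGetD arr (num + 1) 0 < PySem.List.pyGetD arr num 0 then (true, num + 1) else s)
          (false, 0) (PySem.List.pyRange 0 ((arr.length : Int) - 1) 1)).2
          = (List.foldl (fun (s : Bool × Int) num =>
          if PySem.List.pyGetD arr (num + 1) 0 < PySem.List.pyGetD arr num 0 then (true, num + 1) else s)
          (false, -1) (PySem.List.pyRange 0 ((arr.length : Int) - 1) 1)).2 :=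
        pv_pfold_snd_indep _ _ hd false false 0 (-1)
      have e2' : (List.foldl (fun (s : Bool × Int) num =>
          if PySem.List.pyGetD arr (num + 1) 0 < PySem.List.pyGetD arr num 0 then (true, num + 1) else s)
          (false, 0) (PySem.List.pyRange 0 ((arr.length : Int) - 1) 1)).2
          = (List.foldl (fun (s : Bool × Int) num =>
          if PySem.List.pyGetD arr (num + 1) 0 < PySem.List.pyGetD arr num 0 then (true, num + 1) else s)
          (false, 1) (PySem.List.pyRange 0 ((arr.length : Int) - 1) 1)).2 :=
        pv_pfold_snd_indep _ _ hd false false 0 1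
      have p2 : (List.foldl (fun (s : Bool × Int) num =>
          if PySem.List.pyGetD arr (num + 1) 0 < PySem.List.pyGetD arr num 0 then (true, num + 1) else s)
          (false, 0) (PySem.List.pyRange 0 ((arr.length : Int) - 1) 1)).2 ≠ 0 := by
        rw [e2']
        have := pv_pfold_snd_pos (fun num => PySem.List.pyGetD arr (num + 1) 0 < PySem.List.pyGetD arr num 0)
          (PySem.List.pyRange 0 ((arr.length : Int) - 1) 1) hLnn false 1 le_rfl
        beta_reduce at this
        omega
      simp only [hu, hd, Bool.and_self, Bool.not_true, Bool.false_eq_true, if_false, if_true]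
      by_cases hc : PySem.List.pyGetD arr 0 0 < PySem.List.pyGetD arr 1 0
      · rw [if_pos hc, if_pos hc, if_neg p1, e1]
      · rw [if_neg hc, if_neg hc, if_neg p2, e2]
    · simp only [hu, hd, Bool.and_false, Bool.and_true, Bool.false_eq_true, if_false, Bool.not_false, if_true]
      split_ifs <;> omega
  · simp only [hu, Bool.false_and, Bool.and_false, Bool.false_eq_true, if_false,
      Bool.not_false, if_true]
    split_ifs <;> omega

-- ===== VERDICT (by name: the statement is the Claim_ definition above) =====
theorem ArrayChallenge_spec : Claim_equal_ArrayChallenge := by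
  intro arr _ _
  unfold Spec_ArrayChallenge
  exact pv_main arr
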